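-- pv_equiv track=rewrite | github.com/Razerpoa/cool_steg | cool_steg/rle.py | _encode_char_run
-- ===== SOURCE A (Python) =====
-- def _encode_char_run(char: str, count: int) -> str:
--     if count < 2:
--         return char
--
--     s = [char]
--     temp_count = count
--     while temp_count > 26:
--         s.append('Z')
--         temp_count -= 26
--     if temp_count > 0:
--         s.append(chr(ord('A') + temp_count - 1))
--     return "".join(s)
-- ===== SOURCE B (Python) =====
-- def _encode_char_run(char: str, count: int) -> str:
--     if count < 2:
--         return char
--     k, rem = divmod(count - 1, 26)
--     return char + 'Z' * k + chr(ord('A') + rem)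
-- ===== Notes on version B (the rewrite author's own statement) =====
-- stated objective: faster
-- what changed: Replaces the repeated-subtraction while loop and list accumulator with a single closed-form divmod(count-1, 26) that yields the number of 'Z' pads and the final letter directly.
import Mathlib
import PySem

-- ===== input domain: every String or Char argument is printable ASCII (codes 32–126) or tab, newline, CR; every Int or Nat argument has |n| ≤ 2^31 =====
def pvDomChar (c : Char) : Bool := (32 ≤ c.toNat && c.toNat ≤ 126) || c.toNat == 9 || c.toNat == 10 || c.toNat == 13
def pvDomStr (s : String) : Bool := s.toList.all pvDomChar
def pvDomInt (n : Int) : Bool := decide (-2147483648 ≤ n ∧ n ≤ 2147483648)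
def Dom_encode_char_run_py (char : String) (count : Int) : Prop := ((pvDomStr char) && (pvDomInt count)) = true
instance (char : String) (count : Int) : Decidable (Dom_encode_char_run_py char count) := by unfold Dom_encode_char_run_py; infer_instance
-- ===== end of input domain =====

-- B replaces A's repeated-subtraction while loop by one closed-form divmod(count-1, 26), building the run code directly.

-- ===== PORT A =====
-- the while loop: returns the final (s, temp_count) state
def pvLoopA (s : List String) (tempCount : Int) : List String × Int :=
  if tempCount > 26 then pvLoopA (s ++ ["Z"]) (tempCount - 26) else (s, tempCount)
termination_by tempCount.toNat
decreasing_by omega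

def encode_char_run_py (char : String) (count : Int) : String :=
  if count < 2 then char
  else
    let p := pvLoopA [char] count
    let s := if p.2 > 0 then p.1 ++ [String.ofList [Char.ofNat (65 + p.2 - 1).toNat]] else p.1
    PySem.Str.join "" s

-- ===== PORT B =====
def encode_char_run_py_alt (char : String) (count : Int) : String :=
  if count < 2 then char
  else
    let k := PySem.Int.floordiv (count - 1) 26
    let rem := PySem.Int.mod (count - 1) 26
    -- char + 'Z'*k + chr(ord('A')+rem): concatenation built on List Char (String.append is kernel-opaque)
    String.ofList (char.toList ++ PySem.List.pyRepeat ['Z'] k ++ [Char.ofNat (65 + rem).toNat])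

-- ===== PRECONDITION & SPEC =====
def Spec_encode_char_run_py (char : String) (count : Int) (out : String) : Prop := out = encode_char_run_py_alt char count
instance (char : String) (count : Int) (out : String) : Decidable (Spec_encode_char_run_py char count out) := by unfold Spec_encode_char_run_py; infer_instance

-- ===== CLAIM (what is proved, stated in full; the proofs are below) =====
def Claim_equal_encode_char_run_py : Prop := ∀ (char : String) (count : Int), Dom_encode_char_run_py char count → Spec_encode_char_run_py char count (encode_char_run_py char count)

-- ===== LEMMAS AND PROOFS =====

-- An empty separator joins to the flat concatenation.
theorem chars_join_empty (xs : List (List Char)) : PySem.Chars.join [] xs = xs.flatten := by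
  show List.intercalate [] xs = xs.flatten
  simp [List.intercalate]
  induction xs with
  | nil => rfl
  | cons h t ih => cases t <;> simp_all [List.intersperse]

-- The while loop appends (t-1)/26 copies of "Z" and leaves temp_count = (t-1) % 26 + 1.
theorem pvLoopA_spec (n : Nat) : ∀ (t : Int), t.toNat ≤ n → 1 ≤ t → ∀ s,
    pvLoopA s t = (s ++ List.replicate ((t - 1) / 26).toNat "Z", (t - 1) % 26 + 1) := by
  induction n with
  | zero => intro t ht h1; omega
  | succ n ih =>
    intro t ht h1 s
    rw [pvLoopA]
    split_ifs with h
    · rw [ih (t - 26) (by omega) (by omega)]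
      have hk : ((t - 1) / 26).toNat = ((t - 26 - 1) / 26).toNat + 1 := by omega
      have hm : (t - 26 - 1) % 26 = (t - 1) % 26 := by omega
      rw [hk, hm, List.replicate_succ, List.append_assoc]
      rfl
    · have hk : ((t - 1) / 26).toNat = 0 := by omega
      have hm : (t - 1) % 26 + 1 = t := by omega
      simp [hk, hm]

-- ===== VERDICT (by name: the statement is the Claim_ definition above) =====
theorem encode_char_run_py_spec : Claim_equal_encode_char_run_py := by
  intro char count _
  unfold Spec_encode_char_run_py encode_char_run_py encode_char_run_py_alt
  split_ifs with h
  · rfl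
  · rw [pvLoopA_spec count.toNat count le_rfl (by omega)]
    have hm0 : 0 ≤ (count - 1) % 26 := Int.emod_nonneg _ (by norm_num)
    have hmlt : (count - 1) % 26 < 26 := Int.emod_lt_of_pos _ (by norm_num)
    have hfd : PySem.Int.floordiv (count - 1) 26 = (count - 1) / 26 :=
      PySem.Int.floordiv_eq_ediv_of_pos (by norm_num)
    have hmd : PySem.Int.mod (count - 1) 26 = (count - 1) % 26 :=
      PySem.Int.mod_eq_emod_of_pos (by norm_num)
    simp only [hfd, hmd]
    have hpos : (0 : Int) < (count - 1) % 26 + 1 := by omega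
    simp only [hpos, if_pos]
    apply String.toList_inj.mp
    rw [PySem.Str.toList_join]
    rw [PySem.List.pyRepeat_singleton]
    have harg : 65 + ((count - 1) % 26 + 1) - 1 = 65 + (count - 1) % 26 := by ring
    rw [harg]
    simp [chars_join_empty, List.map_append, List.map_replicate, String.toList_ofList]
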